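-- pv_equiv track=rewrite | github.com/Artemigos/advent-of-code | python/2015/21/solution.py | calc_win
-- ===== SOURCE A (Python) =====
-- boss = dict(
--     hp = 109,
--     dmg = 8,
--     armor = 2
-- )
--
-- player = dict(
--     hp = 100,
--     dmg = 0,
--     armor = 0
-- )
--
-- weapon_choices = [
--     (8, 4, 0),
--     (10, 5, 0),
--     (25, 6, 0),
--     (40, 7, 0),
--     (74, 8, 0)
-- ]
--
-- armor_choices = [
--     (0, 0, 0),
--     (13, 0, 1),
--     (31, 0, 2),
--     (53, 0, 3),
--     (75, 0, 4),
--     (102, 0, 5)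
-- ]
--
-- ring_choices = [
--     (0, 0, 0),
--     (0, 0, 0),
--     (25, 1, 0),
--     (50, 2, 0),
--     (100, 3, 0),
--     (20, 0, 1),
--     (40, 0, 2),
--     (80, 0, 3)
-- ]
--
-- def calc_win(iw, ia, ir1, ir2):
--     player_dmg = max([weapon_choices[iw][1] + ring_choices[ir1][1] + ring_choices[ir2][1] - boss['armor'], 1])
--     player_armor = armor_choices[ia][2] + ring_choices[ir1][2] + ring_choices[ir2][2]
--     boss_dmg = max([boss['dmg'] - player_armor, 1])
--
--     player_hp = player['hp']
--     boss_hp = boss['hp']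
--     while True:
--         player_hp -= boss_dmg
--         boss_hp -= player_dmg
--         if boss_hp <= 0:
--             return True
--         if player_hp <= 0:
--             return False
-- ===== SOURCE B (Python) =====
-- boss = dict(hp=109, dmg=8, armor=2)
-- player = dict(hp=100, dmg=0, armor=0)
--
-- weapon_choices = [
--     (8, 4, 0),
--     (10, 5, 0),
--     (25, 6, 0),
--     (40, 7, 0),
--     (74, 8, 0)
-- ]
--
-- armor_choices = [
--     (0, 0, 0),
--     (13, 0, 1),
--     (31, 0, 2),
--     (53, 0, 3),
--     (75, 0, 4),
--     (102, 0, 5)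
-- ]
--
-- ring_choices = [
--     (0, 0, 0),
--     (0, 0, 0),
--     (25, 1, 0),
--     (50, 2, 0),
--     (100, 3, 0),
--     (20, 0, 1),
--     (40, 0, 2),
--     (80, 0, 3)
-- ]
--
--
-- def _ceildiv(a, b):
--     return -(-a // b)
--
--
-- def calc_win(iw, ia, ir1, ir2):
--     # gather the chosen gear once, sum its stats in one pass
--     gear = [weapon_choices[iw], armor_choices[ia], ring_choices[ir1], ring_choices[ir2]]
--     total_dmg = sum(g[1] for g in gear)
--     total_armor = sum(g[2] for g in gear)
--     player_dmg = max(total_dmg - boss['armor'], 1)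
--     boss_dmg = max(boss['dmg'] - total_armor, 1)
--     # closed-form round counts; boss is checked first, so a tie favors the player
--     return _ceildiv(boss['hp'], player_dmg) <= _ceildiv(player['hp'], boss_dmg)
-- ===== Notes on version B (the rewrite author's own statement) =====
-- stated objective: simpler
-- what changed: B gathers the four chosen items into one list and sums their stats in a single pass, then replaces the round-by-round while-loop combat simulation with a closed-form comparison of ceiling-division round counts (tie favors the player since the boss is checked first).
import Mathlib
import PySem

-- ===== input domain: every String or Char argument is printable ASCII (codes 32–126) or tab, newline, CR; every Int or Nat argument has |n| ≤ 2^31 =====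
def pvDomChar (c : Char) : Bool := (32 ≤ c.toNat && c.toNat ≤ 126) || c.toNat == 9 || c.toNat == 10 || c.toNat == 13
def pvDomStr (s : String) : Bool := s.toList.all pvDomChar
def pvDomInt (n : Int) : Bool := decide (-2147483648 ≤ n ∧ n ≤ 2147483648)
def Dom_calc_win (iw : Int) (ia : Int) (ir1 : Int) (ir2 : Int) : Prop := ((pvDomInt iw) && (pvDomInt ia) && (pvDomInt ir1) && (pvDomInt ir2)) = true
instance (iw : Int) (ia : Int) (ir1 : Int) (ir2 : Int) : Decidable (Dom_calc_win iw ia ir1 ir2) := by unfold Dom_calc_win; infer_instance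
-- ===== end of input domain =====

-- B gathers the chosen items into one list, sums their stats in one pass, and replaces A's
-- round-by-round while-loop with a closed-form ceiling-division round-count comparison (simpler).

-- ===== PORT A =====
-- module-level data tables (shared by both ports, as in the Python modules)
def weapon_choices : List (Int × Int × Int) :=
  [(8, 4, 0), (10, 5, 0), (25, 6, 0), (40, 7, 0), (74, 8, 0)]
def armor_choices : List (Int × Int × Int) :=
  [(0, 0, 0), (13, 0, 1), (31, 0, 2), (53, 0, 3), (75, 0, 4), (102, 0, 5)]
def ring_choices : List (Int × Int × Int) :=
  [(0, 0, 0), (0, 0, 0), (25, 1, 0), (50, 2, 0), (100, 3, 0), (20, 0, 1), (40, 0, 2), (80, 0, 3)]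

-- A's while-loop; Python's loop terminates because player_dmg ≥ 1, carried here as hpd
def fightLoop (bd pd : Int) (hpd : 1 ≤ pd) (php bhp : Int) : Bool :=
  let php' := php - bd
  let bhp' := bhp - pd
  if bhp' ≤ 0 then true
  else if php' ≤ 0 then false
  else fightLoop bd pd hpd php' bhp'
termination_by bhp.toNat
decreasing_by simp only [not_le] at *; omega

-- out-of-range table indices raise IndexError in Python (excluded by Pre_); .getD is unreached inside Pre_
def calc_win (iw : Int) (ia : Int) (ir1 : Int) (ir2 : Int) : Bool :=
  let w := (PySem.List.pyGet? weapon_choices iw).getD (0, 0, 0)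
  let a := (PySem.List.pyGet? armor_choices ia).getD (0, 0, 0)
  let r1 := (PySem.List.pyGet? ring_choices ir1).getD (0, 0, 0)
  let r2 := (PySem.List.pyGet? ring_choices ir2).getD (0, 0, 0)
  let player_dmg := max (w.2.1 + r1.2.1 + r2.2.1 - 2) 1
  let player_armor := a.2.2 + r1.2.2 + r2.2.2
  let boss_dmg := max (8 - player_armor) 1
  fightLoop boss_dmg player_dmg (le_max_right _ _) 100 109

-- ===== PORT B =====
-- ceiling division -((-a) // b), as _ceildiv in Source B
def cdiv (a b : Int) : Int := -(PySem.Int.floordiv (-a) b)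

def calc_win_alt (iw : Int) (ia : Int) (ir1 : Int) (ir2 : Int) : Bool :=
  let gear : List (Int × Int × Int) :=
    [(PySem.List.pyGet? weapon_choices iw).getD (0, 0, 0),
     (PySem.List.pyGet? armor_choices ia).getD (0, 0, 0),
     (PySem.List.pyGet? ring_choices ir1).getD (0, 0, 0),
     (PySem.List.pyGet? ring_choices ir2).getD (0, 0, 0)]
  let total_dmg := (gear.map (fun g => g.2.1)).sum
  let total_armor := (gear.map (fun g => g.2.2)).sum
  let player_dmg := max (total_dmg - 2) 1
  let boss_dmg := max (8 - total_armor) 1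
  decide (cdiv 109 player_dmg ≤ cdiv 100 boss_dmg)

-- ===== PRECONDITION & SPEC =====
-- Pre_ excludes exactly the table indices on which Python's list indexing raises IndexError
def Pre_calc_win (iw : Int) (ia : Int) (ir1 : Int) (ir2 : Int) : Prop :=
  (-5 ≤ iw ∧ iw < 5) ∧ (-6 ≤ ia ∧ ia < 6) ∧ (-8 ≤ ir1 ∧ ir1 < 8) ∧ (-8 ≤ ir2 ∧ ir2 < 8)
instance (iw : Int) (ia : Int) (ir1 : Int) (ir2 : Int) : Decidable (Pre_calc_win iw ia ir1 ir2) := by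
  unfold Pre_calc_win; infer_instance
def pvWitness_calc_win : Int × Int × Int × Int := (4, 5, 4, 7)
def Spec_calc_win (iw : Int) (ia : Int) (ir1 : Int) (ir2 : Int) (out : Bool) : Prop := out = calc_win_alt iw ia ir1 ir2
instance (iw : Int) (ia : Int) (ir1 : Int) (ir2 : Int) (out : Bool) : Decidable (Spec_calc_win iw ia ir1 ir2 out) := by unfold Spec_calc_win; infer_instance

-- ===== CLAIM =====
def Claim_equal_calc_win : Prop := ∀ (iw : Int) (ia : Int) (ir1 : Int) (ir2 : Int), Dom_calc_win iw ia ir1 ir2 → Pre_calc_win iw ia ir1 ir2 → Spec_calc_win iw ia ir1 ir2 (calc_win iw ia ir1 ir2)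

-- ===== LEMMAS AND PROOFS =====

theorem cdiv_bounds (a b : Int) (hb : 0 < b) : (cdiv a b - 1) * b < a ∧ a ≤ cdiv a b * b := by
  have := (PySem.Int.neg_floordiv_neg_eq_iff_of_pos (a := a) (b := b) (q := cdiv a b) hb).mp rfl
  exact this

theorem cdiv_pos (a b : Int) (ha : 1 ≤ a) (hb : 0 < b) : 1 ≤ cdiv a b := by
  obtain ⟨_, h2⟩ := cdiv_bounds a b hb
  by_contra h
  push Not at h
  nlinarith

theorem cdiv_eq_one (a b : Int) (ha : 1 ≤ a) (hab : a ≤ b) (hb : 0 < b) : cdiv a b = 1 := by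
  rw [cdiv, PySem.Int.neg_floordiv_neg_eq_iff_of_pos hb]
  constructor <;> simp <;> omega

theorem cdiv_two_le (a b : Int) (hab : b < a) (hb : 0 < b) : 2 ≤ cdiv a b := by
  obtain ⟨_, h2⟩ := cdiv_bounds a b hb
  by_contra h
  push Not at h
  nlinarith

theorem cdiv_sub (a b : Int) (hb : 0 < b) : cdiv (a - b) b = cdiv a b - 1 := by
  obtain ⟨h1, h2⟩ := cdiv_bounds a b hb
  rw [cdiv, PySem.Int.neg_floordiv_neg_eq_iff_of_pos hb]
  constructor <;> nlinarith

theorem fightLoop_eq_cdiv (bd pd : Int) (hpd : 1 ≤ pd) (hbd : 1 ≤ bd) (php bhp : Int)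
    (hphp : 1 ≤ php) (hbhp : 1 ≤ bhp) :
    fightLoop bd pd hpd php bhp = decide (cdiv bhp pd ≤ cdiv php bd) := by
  rw [fightLoop]
  by_cases hB : bhp - pd ≤ 0
  · simp only [hB, if_true]
    have h1 : cdiv bhp pd = 1 := cdiv_eq_one bhp pd hbhp (by omega) (by omega)
    have h2 : 1 ≤ cdiv php bd := cdiv_pos php bd hphp (by omega)
    simp [h1, h2]
  · by_cases hP : php - bd ≤ 0
    · simp only [hB, hP, if_true, if_false]
      have h1 : cdiv php bd = 1 := cdiv_eq_one php bd hphp (by omega) (by omega)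
      have h2 : 2 ≤ cdiv bhp pd := cdiv_two_le bhp pd (by omega) (by omega)
      simp [h1]
      omega
    · simp only [hB, hP, if_false]
      rw [fightLoop_eq_cdiv bd pd hpd hbd (php - bd) (bhp - pd) (by omega) (by omega)]
      rw [cdiv_sub bhp pd (by omega), cdiv_sub php bd (by omega)]
      simp only [decide_eq_decide]
      omega
termination_by bhp.toNat
decreasing_by omega

-- in-range weapon picks carry no armor, in-range armor picks carry no damage
theorem weapon_armor_zero (iw : Int) (h : -5 ≤ iw ∧ iw < 5) :
    ((PySem.List.pyGet? weapon_choices iw).getD (0, 0, 0)).2.2 = 0 := by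
  obtain ⟨h1, h2⟩ := h
  interval_cases iw <;> decide

theorem armor_dmg_zero (ia : Int) (h : -6 ≤ ia ∧ ia < 6) :
    ((PySem.List.pyGet? armor_choices ia).getD (0, 0, 0)).2.1 = 0 := by
  obtain ⟨h1, h2⟩ := h
  interval_cases ia <;> decide

-- ===== VERDICT =====
theorem calc_win_spec : Claim_equal_calc_win := by
  intro iw ia ir1 ir2 _ hpre
  obtain ⟨hw, ha, _, _⟩ := hpre
  unfold Spec_calc_win calc_win calc_win_alt
  simp only [List.map, List.sum_cons, List.sum_nil]
  rw [fightLoop_eq_cdiv _ _ _ (le_max_right _ _) _ _ (by norm_num) (by norm_num)]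
  simp only [weapon_armor_zero iw hw, armor_dmg_zero ia ha, decide_eq_decide]
  ring_nf
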